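-- pv_equiv track=rewrite | github.com/SonDo580/dsa-leetcode | 2-Hashing/2.3-More/02.min-cards-to-pickup.py | min_cards_to_pickup
-- ===== SOURCE A (Python) =====
-- def min_cards_to_pickup(cards: list[int]) -> int:
--     last_index_dict: dict[int, int] = {}
--     min_distance = float("inf")
--
--     for i in range(len(cards)):
--         if cards[i] in last_index_dict:
--             min_distance = min(min_distance, i - last_index_dict[cards[i]] + 1)
--         last_index_dict[cards[i]] = i
--
--     return min_distance if min_distance < float("inf") else -1
-- ===== SOURCE B (Python) =====
-- def min_cards_to_pickup(cards: list[int]) -> int: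
--     # Group: value -> list of indices where it appears (in order).
--     positions: dict[int, list[int]] = {}
--     for i, c in enumerate(cards):
--         positions.setdefault(c, []).append(i)
--
--     # Scan each group's consecutive index pairs for the smallest window.
--     best = None
--     for idxs in positions.values():
--         for a, b in zip(idxs, idxs[1:]):
--             gap = b - a + 1
--             if best is None or gap < best:
--                 best = gap
--     return -1 if best is None else best
-- ===== Notes on version B (the rewrite author's own statement) =====
-- stated objective: alternative
-- what changed: Replaces A's single incremental pass (last-index dict + running min) by two differently shaped passes: first group each value's index list in a dict, then walk each group's consecutive index pairs to take the global minimum window.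
import Mathlib
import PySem

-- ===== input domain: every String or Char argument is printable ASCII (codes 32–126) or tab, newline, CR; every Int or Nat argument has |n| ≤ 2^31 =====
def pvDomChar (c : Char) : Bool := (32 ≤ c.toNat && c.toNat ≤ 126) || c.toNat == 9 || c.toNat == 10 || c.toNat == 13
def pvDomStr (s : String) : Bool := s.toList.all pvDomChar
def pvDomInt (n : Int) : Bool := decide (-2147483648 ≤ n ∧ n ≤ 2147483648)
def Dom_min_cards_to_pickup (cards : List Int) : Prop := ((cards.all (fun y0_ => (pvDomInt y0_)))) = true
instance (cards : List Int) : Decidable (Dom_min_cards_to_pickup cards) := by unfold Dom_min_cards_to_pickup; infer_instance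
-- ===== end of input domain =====

-- B is an alternative decomposition (group each value's indices, then scan consecutive pairs); same O(n) cost as A.

-- ===== PORT A =====
-- A's loop 'for i in range(len(cards)): … cards[i] …' visits exactly the (index, value)
-- pairs, ported as a fold over PySem.List.enumerate; min_distance = float('inf') is Option Int none
-- (A only ever stores int distances in it, so no float arithmetic ever happens).
def min_cards_to_pickup (cards : List Int) : Int :=
  let st := (PySem.List.enumerate cards 0).foldl
    (fun (st : PySem.Dict Int Int × Option Int) p =>
      let m' := match st.1.get? p.2 with        -- 'if cards[i] in last_index_dict'
        | some j => some (match st.2 with       -- min(min_distance, i - last + 1); min(inf, x) = x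
            | none => p.1 - j + 1
            | some w => min w (p.1 - j + 1))
        | none => st.2
      (st.1.insert p.2 p.1, m'))                -- last_index_dict[cards[i]] = i
    (PySem.Dict.empty, none)
  match st.2 with
  | some v => v
  | none => -1

-- ===== PORT B =====
-- B's inner loop: 'for a, b in zip(idxs, idxs[1:]): …' (idxs[1:] = drop 1; best None = none)
def gapMinLoop (idxs : List Int) (best : Option Int) : Option Int :=
  (idxs.zip (idxs.drop 1)).foldl
    (fun best p =>
      let gap := p.2 - p.1 + 1
      match best with                            -- 'if best is None or gap < best'
      | none => some gap
      | some w => if gap < w then some gap else some w)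
    best

def min_cards_to_pickup_alt (cards : List Int) : Int :=
  let positions := (PySem.List.enumerate cards 0).foldl
    (fun (d : PySem.Dict Int (List Int)) p => d.modify p.2 [] (· ++ [p.1]))  -- setdefault(c, []).append(i)
    PySem.Dict.empty
  let best := positions.values.foldl (fun b idxs => gapMinLoop idxs b) none
  match best with
  | none => -1
  | some v => v

-- ===== PRECONDITION & SPEC =====
def Spec_min_cards_to_pickup (cards : List Int) (out : Int) : Prop := out = min_cards_to_pickup_alt cards
instance (cards : List Int) (out : Int) : Decidable (Spec_min_cards_to_pickup cards out) := by unfold Spec_min_cards_to_pickup; infer_instance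

-- ===== CLAIM (what is proved, stated in full; the proofs are below) =====
def Claim_equal_min_cards_to_pickup : Prop := ∀ (cards : List Int), Dom_min_cards_to_pickup cards → Spec_min_cards_to_pickup cards (min_cards_to_pickup cards)

-- ===== LEMMAS AND PROOFS =====

-- the common 'fold the min into an optional accumulator' step
def ostep (b : Option Int) (g : Int) : Option Int :=
  some (match b with | none => g | some w => min w g)

lemma ostep_swap (b : Option Int) (g g' : Int) : ostep (ostep b g) g' = ostep (ostep b g') g := by
  cases b <;> simp [ostep, min_assoc, min_comm g g']

lemma foldl_ostep_ostep (l : List Int) (b : Option Int) (g : Int) :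
    l.foldl ostep (ostep b g) = ostep (l.foldl ostep b) g := by
  induction l generalizing b with
  | nil => rfl
  | cons a t ih => simp only [List.foldl_cons, ostep_swap b g a, ih]

def gaps (idxs : List Int) : List Int :=
  (idxs.zip (idxs.drop 1)).map (fun p => p.2 - p.1 + 1)

lemma gapMinLoop_eq (idxs : List Int) (b : Option Int) :
    gapMinLoop idxs b = (gaps idxs).foldl ostep b := by
  unfold gapMinLoop gaps
  rw [List.foldl_map]
  apply PySem.List.foldl_congr_mem
  intro acc p _
  cases acc with
  | none => rfl
  | some w => simp only [ostep]; split_ifs with h <;> simp [min_def] <;> omega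

lemma gapMinLoop_ostep (idxs : List Int) (b : Option Int) (g : Int) :
    gapMinLoop idxs (ostep b g) = ostep (gapMinLoop idxs b) g := by
  simp only [gapMinLoop_eq, foldl_ostep_ostep]

lemma keysFold_ostep (G : Int → List Int) (ks : List Int) (b : Option Int) (g : Int) :
    ks.foldl (fun b k => gapMinLoop (G k) b) (ostep b g)
      = ostep (ks.foldl (fun b k => gapMinLoop (G k) b) b) g := by
  induction ks generalizing b with
  | nil => rfl
  | cons a t ih => simp only [List.foldl_cons, gapMinLoop_ostep, ih]

lemma zip_tail_cons_snoc (l : List Int) : ∀ (a n : Int),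
    ((a :: l) ++ [n]).zip (l ++ [n])
      = (a :: l).zip l ++ [((a :: l).getLast (List.cons_ne_nil a l), n)] := by
  induction l with
  | nil => intro a n; rfl
  | cons b t ih =>
    intro a n
    have := ih b n
    simp only [List.cons_append, List.zip_cons_cons] at *
    simp [this, List.getLast_cons]

lemma zip_tail_snoc (l : List Int) (n : Int) :
    (l ++ [n]).zip ((l ++ [n]).drop 1)
      = l.zip (l.drop 1) ++ (match l.getLast? with | some j => [(j, n)] | none => []) := by
  cases l with
  | nil => rfl
  | cons a t =>
    have h := zip_tail_cons_snoc t a n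
    simp only [List.cons_append, List.drop_succ_cons, List.drop_zero] at *
    rw [h, List.getLast?_eq_some_getLast (List.cons_ne_nil a t)]

lemma gapMinLoop_snoc (l : List Int) (n : Int) (b : Option Int) :
    gapMinLoop (l ++ [n]) b
      = match l.getLast? with
        | some j => ostep (gapMinLoop l b) (n - j + 1)
        | none => gapMinLoop l b := by
  simp only [gapMinLoop_eq, gaps, zip_tail_snoc]
  cases h : l.getLast? with
  | none => simp
  | some j => simp

-- fold of gapMinLoop over keys: entries with pointwise-equal loops give equal folds
lemma bbest_congr (G G' : Int → List Int) :
    ∀ (ks : List Int) (b : Option Int),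
      (∀ k ∈ ks, ∀ c, gapMinLoop (G' k) c = gapMinLoop (G k) c) →
      ks.foldl (fun b k => gapMinLoop (G' k) b) b = ks.foldl (fun b k => gapMinLoop (G k) b) b := by
  intro ks
  induction ks with
  | nil => intro b _; rfl
  | cons a t ih =>
    intro b h
    simp only [List.foldl_cons, h a List.mem_cons_self]
    exact ih _ (fun k hk => h k (List.mem_cons_of_mem _ hk))

-- fold of gapMinLoop over keys, with the entry at one key x changed by one extra ostep
lemma bbest_modify (x g : Int) (G G' : Int → List Int)
    (hstep : ∀ b, gapMinLoop (G' x) b = ostep (gapMinLoop (G x) b) g) :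
    ∀ (ks : List Int) (b : Option Int), ks.Nodup → x ∈ ks →
      (∀ k ∈ ks, k ≠ x → G' k = G k) →
      ks.foldl (fun b k => gapMinLoop (G' k) b) b
        = ostep (ks.foldl (fun b k => gapMinLoop (G k) b) b) g := by
  intro ks
  induction ks with
  | nil => intro b _ hx; cases hx
  | cons a t ih =>
    intro b hnd hx hne
    rcases List.nodup_cons.mp hnd with ⟨hat, hndt⟩
    by_cases hax : a = x
    · subst hax
      simp only [List.foldl_cons, hstep]
      rw [bbest_congr G G' t _ (fun k hk c => by
        rw [hne k (List.mem_cons_of_mem _ hk) (fun he => hat (he ▸ hk))])]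
      exact keysFold_ostep G t _ g
    · rcases List.mem_cons.mp hx with h | hxt
      · exact absurd h.symm hax
      simp only [List.foldl_cons, hne a List.mem_cons_self hax]
      exact ih _ hndt hxt (fun k hk => hne k (List.mem_cons_of_mem _ hk))

-- abbreviations for the two loop states (proof-side only)
def aFold (cards : List Int) : PySem.Dict Int Int × Option Int :=
  (PySem.List.enumerate cards 0).foldl
    (fun (st : PySem.Dict Int Int × Option Int) p =>
      let m' := match st.1.get? p.2 with
        | some j => some (match st.2 with
            | none => p.1 - j + 1
            | some w => min w (p.1 - j + 1))
        | none => st.2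
      (st.1.insert p.2 p.1, m'))
    (PySem.Dict.empty, none)

def bDict (cards : List Int) : PySem.Dict Int (List Int) :=
  (PySem.List.enumerate cards 0).foldl
    (fun (d : PySem.Dict Int (List Int)) p => d.modify p.2 [] (· ++ [p.1]))
    PySem.Dict.empty

def bBest (d : PySem.Dict Int (List Int)) : Option Int :=
  d.values.foldl (fun b idxs => gapMinLoop idxs b) none

lemma aFold_eq (cards : List Int) :
    min_cards_to_pickup cards = (match (aFold cards).2 with | some v => v | none => -1) := rfl

lemma alt_eq (cards : List Int) :
    min_cards_to_pickup_alt cards = (match bBest (bDict cards) with | none => -1 | some v => v) := rfl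

lemma nodup_keys_bDict (cards : List Int) : (bDict cards).keys.Nodup := by
  exact PySem.Dict.nodup_keys_foldl_modify_key (PySem.List.enumerate cards 0)
    (fun p => p.2) [] (fun d p => (· ++ [p.1])) PySem.Dict.empty
    (by simp [PySem.Dict.keys_empty])

lemma bBest_keys (d : PySem.Dict Int (List Int)) (hnd : d.keys.Nodup) :
    bBest d = d.keys.foldl (fun b k => gapMinLoop (d.getD k []) b) none := by
  rw [bBest, PySem.Dict.values_eq_map_keys d hnd [], List.foldl_map]

lemma aFold_snoc (xs : List Int) (x : Int) :
    aFold (xs ++ [x]) =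
      ((aFold xs).1.insert x (xs.length : Int),
       match (aFold xs).1.get? x with
        | some j => ostep (aFold xs).2 ((xs.length : Int) - j + 1)
        | none => (aFold xs).2) := by
  unfold aFold
  rw [PySem.List.enumerate_append, List.foldl_append]
  simp [PySem.List.enumerate, ostep]

lemma bDict_snoc (xs : List Int) (x : Int) :
    bDict (xs ++ [x]) = (bDict xs).modify x [] (· ++ [(xs.length : Int)]) := by
  unfold bDict
  rw [PySem.List.enumerate_append, List.foldl_append]
  simp [PySem.List.enumerate]

-- the A-state ties to the B-dict: A's last index is the last of B's index list, and
-- A's running min is B's min over all groups' consecutive gaps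
lemma main_inv (cards : List Int) :
    (∀ v, (aFold cards).1.get? v = ((bDict cards).getD v []).getLast?)
    ∧ (aFold cards).2 = bBest (bDict cards) := by
  induction cards using List.reverseRecOn with
  | nil =>
    refine ⟨fun v => ?_, rfl⟩
    simp [aFold, bDict, PySem.List.enumerate, PySem.Dict.get?_empty, PySem.Dict.getD_empty]
  | append_singleton xs x ih =>
    obtain ⟨h1, h2⟩ := ih
    have hnd := nodup_keys_bDict xs
    have hnd' := nodup_keys_bDict (xs ++ [x])
    rw [bDict_snoc] at hnd' ⊢
    rw [aFold_snoc]
    set d := bDict xs with hd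
    set n : Int := (xs.length : Int) with hn
    set d' := d.modify x [] (· ++ [n]) with hd'
    constructor
    · intro v
      simp only [PySem.Dict.get?_insert, hd', PySem.Dict.getD_modify]
      by_cases hvx : v = x
      · subst hvx; simp
      · simp [hvx, h1 v]
    · -- the running-min component
      have hkeys' : d'.keys = (d.insert x ((d.getD x []) ++ [n])).keys :=
        PySem.Dict.keys_modify d x [] (· ++ [n])
      have hG' : ∀ k, d'.getD k [] = if k = x then d.getD x [] ++ [n] else d.getD k [] :=
        fun k => PySem.Dict.getD_modify d x k [] (· ++ [n])
      rw [bBest_keys d' hnd', bBest_keys d hnd] at *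
      show (match (aFold xs).1.get? x with
        | some j => ostep (aFold xs).2 (n - j + 1)
        | none => (aFold xs).2)
        = d'.keys.foldl (fun b k => gapMinLoop (d'.getD k []) b) none
      rw [h1 x]
      by_cases hc : d.contains x = true
      · -- x already grouped: keys unchanged, x's list gains index n
        have hkeq : d'.keys = d.keys := by
          rw [hkeys', PySem.Dict.keys_insert_of_contains d _ hc]
        cases hlast : (d.getD x []).getLast? with
        | none =>
          -- stored list empty: x's entry becomes [n]; both its loops are the identity
          have hemp : d.getD x [] = [] := List.getLast?_eq_none_iff.mp hlast
          rw [hkeq]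
          have hcong : d.keys.foldl (fun b k => gapMinLoop (d'.getD k []) b) none
              = d.keys.foldl (fun b k => gapMinLoop (d.getD k []) b) none := by
            apply bbest_congr
            intro k hk c
            rw [hG' k]
            by_cases hkx : k = x
            · subst hkx; rw [if_pos rfl, hemp]; rfl
            · rw [if_neg hkx]
          rw [hcong, ← h2]
        | some j =>
          have hstep : ∀ b, gapMinLoop (d'.getD x []) b
              = ostep (gapMinLoop (d.getD x []) b) (n - j + 1) := by
            intro b
            rw [hG' x, if_pos rfl, gapMinLoop_snoc, hlast]
          rw [hkeq]
          rw [bbest_modify x (n - j + 1) (fun k => d.getD k []) (fun k => d'.getD k [])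
            hstep d.keys none hnd ((PySem.Dict.contains_iff_mem_keys d x).mp hc)
            (fun k _ hk => by show d'.getD k [] = d.getD k []; rw [hG' k, if_neg hk]), ← h2]
      · -- x unseen: A's lookup misses, B appends a fresh singleton group (no pair)
        have hc' : d.contains x = false := by simpa using hc
        have hemp : d.getD x [] = [] := PySem.Dict.getD_of_not_contains d [] hc'
        rw [hemp]
        have hkeq : d'.keys = d.keys ++ [x] := by
          rw [hkeys', PySem.Dict.keys_insert_of_not_contains d _ hc']
        have hxnot : x ∉ d.keys := fun h =>
          by rw [(PySem.Dict.contains_iff_mem_keys d x).mpr h] at hc'; cases hc'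
        rw [hkeq, List.foldl_append]
        have hcong : d.keys.foldl (fun b k => gapMinLoop (d'.getD k []) b) none
            = d.keys.foldl (fun b k => gapMinLoop (d.getD k []) b) none := by
          apply bbest_congr
          intro k hk c
          have hkx : k ≠ x := fun he => hxnot (he ▸ hk)
          rw [hG' k, if_neg hkx]
        have hsing : d'.getD x [] = [n] := by rw [hG' x, if_pos rfl, hemp]; rfl
        rw [hcong, ← h2]
        simp only [List.foldl_cons, List.foldl_nil, hsing]
        rfl

lemma main (cards : List Int) : min_cards_to_pickup cards = min_cards_to_pickup_alt cards := by
  rw [aFold_eq, alt_eq, (main_inv cards).2]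
  cases bBest (bDict cards) <;> rfl

-- ===== VERDICT (by name: the statement is the Claim_ definition above) =====
theorem min_cards_to_pickup_spec : Claim_equal_min_cards_to_pickup := by
  intro cards _
  unfold Spec_min_cards_to_pickup
  exact main cards
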